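-- pv_equiv track=rewrite | github.com/agam-lang/benchmarks | suites/01_algorithms/comparisons/quicksort.py | quicksort_cost
-- ===== SOURCE A (Python) =====
-- def partition_cost(low: int, high: int, pivot: int) -> int:
--     score = 0
--     for i in range(low, high):
--         probe = ((i * 17) + 13) % 997
--         if probe < pivot:
--             score += probe
--         else:
--             score -= probe
--     return score
--
-- def quicksort_cost(low: int, high: int) -> int:
--     if high - low < 2:
--         return high - low
--     pivot = (low + high) // 2
--     return (
--         partition_cost(low, high, pivot)
--         + quicksort_cost(low, pivot)
--         + quicksort_cost(pivot + 1, high)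
--     )
-- ===== SOURCE B (Python) =====
-- # Faster re-implementation: per recursion node the partition cost is read off a
-- # precomputed 998x998 table of prefix sums of the signed length-997-periodic probe
-- # sequence (one row per clamped pivot), making each node O(1); the recursion is
-- # replaced by an explicit stack loop.
--
-- _P = 997
--
-- def _build_table():
--     table = []
--     for p in range(_P + 1):
--         row = [0] * (_P + 1)
--         acc = 0
--         for j in range(_P):
--             probe = (j * 17 + 13) % _P
--             acc += probe if probe < p else -probe
--             row[j + 1] = acc
--         table.append(row)
--     return table
--
-- _SG = _build_table()
--
-- def _partition_cost_fast(low, high, pivot):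
--     n = high - low
--     p = 0 if pivot < 0 else (_P if pivot > _P else pivot)
--     q, r = divmod(n, _P)
--     s = low % _P
--     row = _SG[p]
--     full = row[_P]
--     e = s + r
--     if e <= _P:
--         win = row[e] - row[s]
--     else:
--         win = full - row[s] + row[e - _P]
--     return q * full + win
--
-- def quicksort_cost(low, high):
--     total = 0
--     stack = [(low, high)]
--     while stack:
--         low, high = stack.pop()
--         if high - low < 2:
--             total += high - low
--         else:
--             pivot = (low + high) // 2
--             total += _partition_cost_fast(low, high, pivot)
--             stack.append((low, pivot))
--             stack.append((pivot + 1, high))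
--     return total
-- ===== Notes on version B (the rewrite author's own statement) =====
-- stated objective: faster
-- what changed: partition_cost's per-element loop is replaced by O(1) lookups into a precomputed 998x998 table of prefix sums of the signed 997-periodic probe sequence (one row per clamped pivot, full periods by multiplication, remainder by a wrap-around prefix difference), and the recursion is replaced by an explicit stack loop.
import Mathlib
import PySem

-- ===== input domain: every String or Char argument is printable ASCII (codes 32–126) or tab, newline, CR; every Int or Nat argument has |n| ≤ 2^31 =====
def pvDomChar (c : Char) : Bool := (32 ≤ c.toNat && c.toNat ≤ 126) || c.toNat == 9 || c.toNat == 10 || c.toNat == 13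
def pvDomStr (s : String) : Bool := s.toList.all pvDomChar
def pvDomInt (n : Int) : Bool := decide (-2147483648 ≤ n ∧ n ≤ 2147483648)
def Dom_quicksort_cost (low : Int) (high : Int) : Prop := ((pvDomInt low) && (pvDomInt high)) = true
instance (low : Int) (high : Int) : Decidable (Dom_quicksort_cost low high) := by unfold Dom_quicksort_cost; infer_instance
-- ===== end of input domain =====

-- B replaces the per-element partition loop by O(1) lookups into precomputed prefix sums
-- of the signed 997-periodic probe sequence, and the recursion by an explicit stack loop
-- (objective: faster).

-- ===== PORT A =====
def partition_cost (low : Int) (high : Int) (pivot : Int) : Int :=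
  (PySem.List.pyRange low high 1).foldl
    (fun score i =>
      let probe := PySem.Int.mod (i * 17 + 13) 997
      if probe < pivot then score + probe else score - probe) 0

-- the fuel argument is only a structural-termination guard: (high - low).toNat + 1
-- always suffices (sub-intervals are strictly shorter), so the 0-fuel branch is never
-- reached from quicksort_cost
def qcGo : Nat → Int → Int → Int
  | 0, _, _ => 0
  | fuel + 1, low, high =>
    if high - low < 2 then high - low
    else
      let pivot := PySem.Int.floordiv (low + high) 2
      partition_cost low high pivot + qcGo fuel low pivot + qcGo fuel (pivot + 1) high

def quicksort_cost (low : Int) (high : Int) : Int :=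
  qcGo ((high - low).toNat + 1) low high

-- ===== PORT B =====
-- Row p of Source B's table _SG: sgRow p j = _SG[p][j], built by the same prefix-sum
-- recurrence as the Python build loop (acc after j steps).
def sgRow (p : Int) : Nat → Int
  | 0 => 0
  | j + 1 =>
    let probe := PySem.Int.mod ((j : Int) * 17 + 13) 997
    sgRow p j + (if probe < p then probe else -probe)

def partition_cost_fast (low : Int) (high : Int) (pivot : Int) : Int :=
  let n := high - low
  let p : Int := if pivot < 0 then 0 else if pivot > 997 then 997 else pivot
  let q := PySem.Int.floordiv n 997
  let r := PySem.Int.mod n 997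
  let s := PySem.Int.mod low 997
  let full := sgRow p 997
  let e := s + r
  let win := if e ≤ 997 then sgRow p e.toNat - sgRow p s.toNat
             else full - sgRow p s.toNat + sgRow p (e - 997).toNat
  q * full + win

-- Source B's while loop over the explicit stack (head of the list = top of the stack); the
-- fuel argument is only a structural-termination guard: each iteration strictly
-- decreases the measure sum of (2*(high-low).toNat + 1) over the stack, so the initial
-- fuel in quicksort_cost_alt always outlasts the loop
def qsLoopGo : Nat → List (Int × Int) → Int → Int
  | 0, _, total => total
  | fuel + 1, stack, total =>
    match stack with
    | [] => total
    | (low, high) :: stack =>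
      if high - low < 2 then qsLoopGo fuel stack (total + (high - low))
      else
        let pivot := PySem.Int.floordiv (low + high) 2
        qsLoopGo fuel ((pivot + 1, high) :: (low, pivot) :: stack)
          (total + partition_cost_fast low high pivot)

def quicksort_cost_alt (low : Int) (high : Int) : Int :=
  qsLoopGo (2 * (high - low).toNat + 1) [(low, high)] 0

-- ===== PRECONDITION & SPEC =====
def Spec_quicksort_cost (low : Int) (high : Int) (out : Int) : Prop := out = quicksort_cost_alt low high
instance (low : Int) (high : Int) (out : Int) : Decidable (Spec_quicksort_cost low high out) := by unfold Spec_quicksort_cost; infer_instance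

-- ===== CLAIM (what is proved, stated in full; the proofs are below) =====
def Claim_equal_quicksort_cost : Prop := ∀ (low : Int) (high : Int), Dom_quicksort_cost low high → Spec_quicksort_cost low high (quicksort_cost low high)

-- ===== LEMMAS AND PROOFS =====

-- the signed probe value added for index i when the threshold is p
def gval (p : Int) (i : Int) : Int :=
  let probe := PySem.Int.mod (i * 17 + 13) 997
  if probe < p then probe else -probe

-- S p a n = sum of gval p over the n indices a, a+1, …, a+n-1
def S (p : Int) : Int → Nat → Int
  | _, 0 => 0
  | a, n + 1 => gval p a + S p (a + 1) n

theorem foldl_eq_S (p : Int) : ∀ (n : Nat) (a b c : Int), (b - a).toNat = n →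
    (PySem.List.pyRange a b 1).foldl
      (fun score i =>
        let probe := PySem.Int.mod (i * 17 + 13) 997
        if probe < p then score + probe else score - probe) c
    = c + S p a n := by
  intro n
  induction n with
  | zero =>
    intro a b c h
    rw [PySem.List.pyRange_one_eq_nil (by omega)]
    simp [S]
  | succ n ih =>
    intro a b c h
    rw [PySem.List.pyRange_one_cons (by omega)]
    simp only [List.foldl_cons]
    rw [ih (a + 1) b _ (by omega)]
    simp only [S, gval]
    split_ifs <;> ring

theorem S_succ_right (p : Int) : ∀ (n : Nat) (a : Int), S p a (n + 1) = S p a n + gval p (a + n) := by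
  intro n
  induction n with
  | zero => intro a; simp [S]
  | succ n ih =>
    intro a
    have hL : S p a (n + 1 + 1) = gval p a + S p (a + 1) (n + 1) := rfl
    have hR : S p a (n + 1) = gval p a + S p (a + 1) n := rfl
    rw [hL, hR, ih (a + 1)]
    have h2 : a + 1 + (n : Int) = a + ((n : Nat) + 1 : Nat) := by push_cast; ring
    rw [h2]
    ring

theorem S_split (p : Int) : ∀ (n m : Nat) (a : Int), S p a (n + m) = S p a n + S p (a + n) m := by
  intro n
  induction n with
  | zero => intro m a; simp [S]
  | succ n ih =>
    intro m a
    have h1 : (n + 1) + m = (n + m) + 1 := by omega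
    rw [h1]
    have hL : S p a ((n + m) + 1) = gval p a + S p (a + 1) (n + m) := rfl
    have hR : S p a (n + 1) = gval p a + S p (a + 1) n := rfl
    rw [hL, hR, ih m (a + 1)]
    have h2 : a + 1 + (n : Int) = a + ((n : Nat) + 1 : Nat) := by push_cast; ring
    rw [h2]
    ring

theorem gval_period (p i : Int) : gval p (i + 997) = gval p i := by
  have h : PySem.Int.mod ((i + 997) * 17 + 13) 997 = PySem.Int.mod (i * 17 + 13) 997 := by
    rw [PySem.Int.mod_eq_emod_of_pos (by norm_num), PySem.Int.mod_eq_emod_of_pos (by norm_num)]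
    have : (i + 997) * 17 + 13 = (i * 17 + 13) + 997 * 17 := by ring
    rw [this]
    omega
  simp only [gval, h]

theorem S_shift (p : Int) : ∀ (n : Nat) (a : Int), S p (a + 997) n = S p a n := by
  intro n
  induction n with
  | zero => intro a; simp [S]
  | succ n ih =>
    intro a
    show gval p (a + 997) + S p (a + 997 + 1) n = gval p a + S p (a + 1) n
    rw [gval_period, show a + 997 + 1 = (a + 1) + 997 by ring, ih]

theorem S_shift_mul (p : Int) (n : Nat) (t : Int) : ∀ (a : Int), S p (a + 997 * t) n = S p a n := by
  induction t using Int.induction_on with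
  | zero => intro a; norm_num
  | succ k ih =>
    intro a
    have : a + 997 * ((k : Int) + 1) = (a + 997 * k) + 997 := by ring
    rw [this, S_shift, ih]
  | pred k ih =>
    intro a
    have : a + 997 * (-(k : Int) - 1) + 997 = a + 997 * (-(k : Int)) := by ring
    calc S p (a + 997 * (-(k : Int) - 1)) n
        = S p (a + 997 * (-(k : Int) - 1) + 997) n := (S_shift p n _).symm
      _ = S p (a + 997 * (-(k : Int))) n := by rw [this]
      _ = S p a n := ih a

theorem gval_clamp (pivot i : Int) :
    gval pivot i = gval (if pivot < 0 then 0 else if pivot > 997 then 997 else pivot) i := by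
  have h0 := PySem.Int.mod_nonneg (i * 17 + 13) (b := 997) (by norm_num)
  have h1 := PySem.Int.mod_lt (i * 17 + 13) (b := 997) (by norm_num)
  simp only [gval]
  split_ifs <;> omega

theorem S_clamp (pivot : Int) : ∀ (n : Nat) (a : Int),
    S pivot a n = S (if pivot < 0 then 0 else if pivot > 997 then 997 else pivot) a n := by
  intro n
  induction n with
  | zero => intro a; simp [S]
  | succ n ih =>
    intro a
    show gval pivot a + S pivot (a + 1) n = _
    rw [gval_clamp, ih]
    rfl

theorem sgRow_eq (p : Int) : ∀ (j : Nat), sgRow p j = S p 0 j := by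
  intro j
  induction j with
  | zero => simp [sgRow, S]
  | succ j ih =>
    show sgRow p j + _ = S p 0 (j + 1)
    rw [ih, S_succ_right]
    simp [gval]

theorem S_period_full (p : Int) (s : Nat) : S p (s : Int) 997 = sgRow p 997 := by
  have h1 : S p 0 (s + 997) = S p 0 s + S p (s : Int) 997 := by
    have := S_split p s 997 0
    simpa using this
  have h2 : S p 0 (997 + s) = S p 0 997 + S p (0 + 997) s := S_split p 997 s 0
  have h3 : S p (0 + 997) s = S p 0 s := by
    have := S_shift p s 0
    simpa using this
  have h4 : s + 997 = 997 + s := by omega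
  rw [sgRow_eq]
  rw [h4] at h1
  omega

theorem S_peel (p : Int) (s : Nat) : ∀ (Q R : Nat),
    S p (s : Int) (997 * Q + R) = Q * sgRow p 997 + S p (s : Int) R := by
  intro Q
  induction Q with
  | zero => intro R; simp
  | succ Q ih =>
    intro R
    have h1 : 997 * (Q + 1) + R = 997 + (997 * Q + R) := by omega
    rw [h1, S_split, S_period_full]
    have h2 : (s : Int) + (997 : Nat) = ((s + 997 : Nat) : Int) := by push_cast; ring
    rw [h2]
    have h3 : S p ((s + 997 : Nat) : Int) (997 * Q + R) = S p (s : Int) (997 * Q + R) := by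
      have : ((s + 997 : Nat) : Int) = (s : Int) + 997 := by push_cast; ring
      rw [this, S_shift]
    rw [h3, ih R]
    push_cast; ring

theorem sgRow_add_997 (p : Int) (m : Nat) : sgRow p (997 + m) = sgRow p 997 + sgRow p m := by
  rw [sgRow_eq, sgRow_eq, sgRow_eq, S_split]
  congr 1
  have h : (0 : Int) + ((997 : Nat) : Int) = (0 : Int) + 997 := by norm_num
  rw [h, S_shift]

theorem S_rem (p : Int) (s R : Nat) :
    S p (s : Int) R = sgRow p (s + R) - sgRow p s := by
  have h1 : S p 0 (s + R) = S p 0 s + S p ((0 : Int) + s) R := S_split p s R 0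
  rw [sgRow_eq, sgRow_eq]
  simp at h1
  omega

theorem partition_eq (low high pivot : Int) (h : low ≤ high) :
    partition_cost low high pivot = partition_cost_fast low high pivot := by
  have h997 : (0 : Int) < 997 := by norm_num
  have hA : partition_cost low high pivot = S pivot low (high - low).toNat := by
    unfold partition_cost
    rw [foldl_eq_S pivot (high - low).toNat low high 0 rfl]
    ring
  have hq : PySem.Int.floordiv (high - low) 997 = (((high - low).toNat / 997 : Nat) : Int) := by
    rw [PySem.Int.floordiv_eq_ediv_of_pos h997]; omega
  have hr : PySem.Int.mod (high - low) 997 = (((high - low).toNat % 997 : Nat) : Int) := by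
    rw [PySem.Int.mod_eq_emod_of_pos h997]; omega
  have hsm : PySem.Int.mod low 997 = (((low % 997).toNat : Nat) : Int) := by
    rw [PySem.Int.mod_eq_emod_of_pos h997]; omega
  set p : Int := if pivot < 0 then 0 else if pivot > 997 then 997 else pivot with hpdef
  set N : Nat := (high - low).toNat with hNdef
  set Q : Nat := N / 997 with hQdef
  set R : Nat := N % 997 with hRdef
  set sN : Nat := (low % 997).toNat with hsdef
  have hB : partition_cost_fast low high pivot =
      (Q : Int) * sgRow p 997 +
        (if (sN : Int) + (R : Int) ≤ 997
          then sgRow p ((sN : Int) + (R : Int)).toNat - sgRow p ((sN : Int)).toNat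
          else sgRow p 997 - sgRow p ((sN : Int)).toNat
                + sgRow p (((sN : Int) + (R : Int)) - 997).toNat) := by
    simp only [partition_cost_fast]
    rw [hq, hr, hsm]
  have hS1 : S pivot low N = S p ((sN : Int)) N := by
    rw [S_clamp pivot N low, ← hpdef]
    have hl : low = (sN : Int) + 997 * (low / 997) := by omega
    rw [hl, S_shift_mul]
  have hNQR : N = 997 * Q + R := by omega
  have hS2 : S p ((sN : Int)) N = (Q : Int) * sgRow p 997 + (sgRow p (sN + R) - sgRow p sN) := by
    rw [hNQR, S_peel, S_rem]
  rw [hA, hS1, hS2, hB]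
  have ht1 : ((sN : Int)).toNat = sN := by omega
  have ht2 : ((sN : Int) + (R : Int)).toNat = sN + R := by omega
  have ht3 : (((sN : Int) + (R : Int)) - 997).toNat = sN + R - 997 := by omega
  rw [ht1, ht2, ht3]
  by_cases hc : sN + R ≤ 997
  · rw [if_pos (by omega : (sN : Int) + (R : Int) ≤ 997)]
  · rw [if_neg (by omega : ¬ ((sN : Int) + (R : Int) ≤ 997))]
    have hm : sN + R = 997 + (sN + R - 997) := by omega
    rw [hm, sgRow_add_997]
    have hm2 : 997 + (sN + R - 997) - 997 = sN + R - 997 := by omega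
    rw [hm2]
    ring

theorem qcGo_fuel : ∀ (f f' : Nat) (low high : Int), (high - low).toNat < f →
    (high - low).toNat < f' → qcGo f low high = qcGo f' low high := by
  intro f
  induction f with
  | zero => intro f' low high hf; omega
  | succ g ih =>
    intro f' low high hf hf'
    cases f' with
    | zero => omega
    | succ g' =>
      show (if high - low < 2 then high - low else _) = (if high - low < 2 then high - low else _)
      by_cases hc : high - low < 2
      · rw [if_pos hc, if_pos hc]
      · rw [if_neg hc, if_neg hc]
        have hpiv : PySem.Int.floordiv (low + high) 2 = (low + high) / 2 :=
          PySem.Int.floordiv_eq_ediv_of_pos (by norm_num)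
        show partition_cost low high (PySem.Int.floordiv (low + high) 2)
              + qcGo g low (PySem.Int.floordiv (low + high) 2)
              + qcGo g (PySem.Int.floordiv (low + high) 2 + 1) high
            = partition_cost low high (PySem.Int.floordiv (low + high) 2)
              + qcGo g' low (PySem.Int.floordiv (low + high) 2)
              + qcGo g' (PySem.Int.floordiv (low + high) 2 + 1) high
        rw [ih g' low (PySem.Int.floordiv (low + high) 2) (by omega) (by omega),
            ih g' (PySem.Int.floordiv (low + high) 2 + 1) high (by omega) (by omega)]

theorem qc_unfold (low high : Int) :
    quicksort_cost low high =
      if high - low < 2 then high - low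
      else
        partition_cost low high (PySem.Int.floordiv (low + high) 2)
          + quicksort_cost low (PySem.Int.floordiv (low + high) 2)
          + quicksort_cost (PySem.Int.floordiv (low + high) 2 + 1) high := by
  show (if high - low < 2 then high - low else _) = _
  by_cases hc : high - low < 2
  · rw [if_pos hc, if_pos hc]
  · rw [if_neg hc, if_neg hc]
    have hpiv : PySem.Int.floordiv (low + high) 2 = (low + high) / 2 :=
      PySem.Int.floordiv_eq_ediv_of_pos (by norm_num)
    unfold quicksort_cost
    rw [qcGo_fuel ((high - low).toNat) ((PySem.Int.floordiv (low + high) 2 - low).toNat + 1)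
          low (PySem.Int.floordiv (low + high) 2) (by omega) (by omega),
        qcGo_fuel ((high - low).toNat) ((high - (PySem.Int.floordiv (low + high) 2 + 1)).toNat + 1)
          (PySem.Int.floordiv (low + high) 2 + 1) high (by omega) (by omega)]

theorem qsLoopGo_eq : ∀ (f : Nat) (st : List (Int × Int)) (total : Int),
    (st.map (fun q => 2 * (q.2 - q.1).toNat + 1)).sum ≤ f →
    qsLoopGo f st total = total + (st.map (fun q => quicksort_cost q.1 q.2)).sum := by
  intro f
  induction f with
  | zero =>
    intro st total hm
    cases st with
    | nil => simp [qsLoopGo]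
    | cons hd tl => simp [List.map_cons, List.sum_cons] at hm
  | succ g ih =>
    intro st total hm
    cases st with
    | nil => simp [qsLoopGo]
    | cons hd tl =>
      obtain ⟨low, high⟩ := hd
      simp only [List.map_cons, List.sum_cons] at hm
      show (if high - low < 2 then qsLoopGo g tl (total + (high - low)) else _)
        = total + ((quicksort_cost low high) + (tl.map (fun q => quicksort_cost q.1 q.2)).sum)
      by_cases hc : high - low < 2
      · rw [if_pos hc, ih tl (total + (high - low)) (by omega)]
        rw [qc_unfold, if_pos hc]
        ring
      · rw [if_neg hc]
        have hpiv : PySem.Int.floordiv (low + high) 2 = (low + high) / 2 :=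
          PySem.Int.floordiv_eq_ediv_of_pos (by norm_num)
        rw [ih _ _ (by simp only [List.map_cons, List.sum_cons]; omega)]
        rw [qc_unfold low high, if_neg hc,
            partition_eq low high (PySem.Int.floordiv (low + high) 2) (by omega)]
        simp only [List.map_cons, List.sum_cons]
        ring

-- ===== VERDICT (by name: the statement is the Claim_ definition above) =====
theorem quicksort_cost_spec : Claim_equal_quicksort_cost := by
  intro low high _
  unfold Spec_quicksort_cost quicksort_cost_alt
  rw [qsLoopGo_eq (2 * (high - low).toNat + 1) [(low, high)] 0 (by simp)]
  simp
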